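-- pv_equiv track=rewrite | github.com/Liorshay054563/Hw22_LiorShay-py-final-work | Hw_22.py | repeated_word
-- ===== SOURCE A (Python) =====
-- def repeated_word(strings):
--     repeats = []
--     seen = []
--     index = 0
--
--     while index < len(strings):
--         current_string = strings[index]
--         if current_string in seen:
--             if current_string not in repeats:
--                 repeats.append(current_string)
--         else:
--             seen.append(current_string)
--         index += 1
--
--     return repeats
-- ===== SOURCE B (Python) =====
-- def repeated_word(strings):
--     occ = {}
--     for i, w in enumerate(strings):
--         occ.setdefault(w, []).append(i)
--     dups = [(ps[1], w) for w, ps in occ.items() if len(ps) >= 2]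
--     dups.sort(key=lambda p: p[0])
--     return [w for _, w in dups]
-- ===== Notes on version B (the rewrite author's own statement) =====
-- stated objective: faster
-- what changed: Replaces A's stateful scan with seen/repeats list-membership tests by a staged algorithm: group all occurrence positions per word in one dict pass, keep words with at least two positions paired with their second position, sort those pairs by position, and project the words.
import Mathlib
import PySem

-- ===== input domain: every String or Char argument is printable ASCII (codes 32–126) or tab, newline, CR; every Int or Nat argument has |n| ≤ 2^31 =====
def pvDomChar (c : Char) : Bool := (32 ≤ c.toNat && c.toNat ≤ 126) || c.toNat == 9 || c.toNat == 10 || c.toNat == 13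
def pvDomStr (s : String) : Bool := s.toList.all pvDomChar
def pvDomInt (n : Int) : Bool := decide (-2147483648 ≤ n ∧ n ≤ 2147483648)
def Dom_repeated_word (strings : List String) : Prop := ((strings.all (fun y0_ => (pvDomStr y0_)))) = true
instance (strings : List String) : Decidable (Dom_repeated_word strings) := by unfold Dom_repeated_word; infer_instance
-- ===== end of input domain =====

-- B replaces A's stateful seen/repeats scan by a staged algorithm: group all occurrence
-- positions per word in a dict, keep words with ≥ 2 positions paired with their second
-- position, sort those pairs by position, project the words.

-- ===== PORT A =====
-- while index < len(strings): … (index-driven loop, membership tests on the seen/repeats lists)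
def repeated_word_loop (strings : List String) :
    List String → List String → Nat → Nat → List String
  | repeats, _, _, 0 => repeats
  | repeats, seen, index, fuel + 1 =>
    if h : index < strings.length then
      let current := strings[index]
      if current ∈ seen then
        if current ∉ repeats then
          repeated_word_loop strings (repeats ++ [current]) seen (index + 1) fuel
        else
          repeated_word_loop strings repeats seen (index + 1) fuel
      else
        repeated_word_loop strings repeats (seen ++ [current]) (index + 1) fuel
    else repeats

-- fuel = len(strings) - index, a totality guard: the while-loop runs exactly that often
def repeated_word (strings : List String) : List String :=
  repeated_word_loop strings [] [] 0 strings.length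

-- ===== PORT B =====
-- occ = {}; for i, w in enumerate(strings): occ.setdefault(w, []).append(i)
--   (setdefault(w, []).append(i) is exactly occ[w] = occ.get(w, []) + [i], i.e. Dict.modify)
-- dups = [(ps[1], w) for w, ps in occ.items() if len(ps) >= 2]   (ps[1] is in range: len(ps) ≥ 2)
-- dups.sort(key=lambda p: p[0]); return [w for _, w in dups]
def repeated_word_alt (strings : List String) : List String :=
  let occ := (PySem.List.enumerate strings).foldl
      (fun (d : PySem.Dict String (List Int)) p => d.modify p.2 [] (fun l => l ++ [p.1]))
      PySem.Dict.empty
  let dups := (occ.items.filter (fun kv => decide (2 ≤ kv.2.length))).map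
      (fun kv => (PySem.List.pyGetD kv.2 1 0, kv.1))
  let sortedDups := PySem.List.sorted dups (fun p => p.1) false
  sortedDups.map (fun p => p.2)

-- ===== PRECONDITION & SPEC =====
def Spec_repeated_word (strings : List String) (out : List String) : Prop := out = repeated_word_alt strings
instance (strings : List String) (out : List String) : Decidable (Spec_repeated_word strings out) := by unfold Spec_repeated_word; infer_instance

-- ===== CLAIM (what is proved, stated in full; the proofs are below) =====
def Claim_equal_repeated_word : Prop := ∀ (strings : List String), Dom_repeated_word strings → Spec_repeated_word strings (repeated_word strings)

-- ===== LEMMAS AND PROOFS =====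

-- pairs (index, word) at which a word's second occurrence happens, in index order
def canonP (s : List String) : List (Int × String) :=
  (PySem.List.enumerate s).filter (fun p => (s.take p.1.toNat).count p.2 == 1)

-- occurrence positions of w in s (Nat-valued, structural)
def posNat (s : List String) (w : String) : List Nat :=
  match s with
  | [] => []
  | x :: xs => if x = w then 0 :: (posNat xs w).map (· + 1) else (posNat xs w).map (· + 1)

def pvPos (s : List String) (w : String) : List Int :=
  List.map (fun n : Nat => (n : Int)) (posNat s w)

def occB (s : List String) : PySem.Dict String (List Int) :=
  (PySem.List.enumerate s).foldl
    (fun d p => d.modify p.2 [] (fun l => l ++ [p.1])) PySem.Dict.empty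

def gfun (s : List String) (w : String) : Int × String :=
  (PySem.List.pyGetD (pvPos s w) 1 0, w)

def Qset (s : List String) : List String :=
  (PySem.Set.ofList s).filter (fun w => decide (2 ≤ (pvPos s w).length))


theorem mapSucc_getElem? (l : List Nat) (k j : Nat) :
    (l.map (· + 1))[k]? = some (j + 1) ↔ l[k]? = some j := by
  rw [List.getElem?_map]; cases h : l[k]? <;> simp

theorem mapSucc_getElem?_zero (l : List Nat) (k : Nat) :
    (l.map (· + 1))[k]? ≠ some 0 := by
  rw [List.getElem?_map]; cases h : l[k]? <;> simp

theorem posNat_getElem? (s : List String) (w : String) :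
    ∀ (k i : Nat), (posNat s w)[k]? = some i ↔ (s[i]? = some w ∧ (s.take i).count w = k) := by
  induction s with
  | nil => intro k i; simp [posNat]
  | cons x xs ih =>
    intro k i
    by_cases hxw : x = w
    · have hp : posNat (x :: xs) w = 0 :: (posNat xs w).map (· + 1) := by
        simp [posNat, hxw]
      rw [hp]
      cases k with
      | zero =>
        cases i with
        | zero => simp [hxw]
        | succ j =>
          constructor
          · intro h; simp at h
          · rintro ⟨-, h⟩
            rw [List.take_succ_cons, List.count_cons, if_pos (by simp [hxw])] at h
            omega
      | succ k =>
        cases i with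
        | zero =>
          constructor
          · intro h
            exact absurd h (mapSucc_getElem?_zero (posNat xs w) k)
          · rintro ⟨-, h⟩; simp at h
        | succ j =>
          rw [List.getElem?_cons_succ, mapSucc_getElem?, ih k j,
            List.getElem?_cons_succ, List.take_succ_cons, List.count_cons,
            if_pos (by simp [hxw])]
          constructor
          · rintro ⟨h1, h2⟩; exact ⟨h1, by omega⟩
          · rintro ⟨h1, h2⟩; exact ⟨h1, by omega⟩
    · have hp : posNat (x :: xs) w = (posNat xs w).map (· + 1) := by
        simp [posNat, hxw]
      rw [hp]
      cases i with
      | zero =>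
        constructor
        · intro h; exact absurd h (mapSucc_getElem?_zero (posNat xs w) k)
        · rintro ⟨h, -⟩; simp at h; exact absurd h hxw
      | succ j =>
        rw [mapSucc_getElem?, ih k j, List.getElem?_cons_succ, List.take_succ_cons,
          List.count_cons, if_neg (by simp [hxw])]
        simp

theorem length_posNat (s : List String) (w : String) : (posNat s w).length = s.count w := by
  induction s with
  | nil => rfl
  | cons x xs ih =>
    by_cases h : x = w <;> simp [posNat, h, ih]

-- enumerate-filter positions equal posNat (shifted by the start)

theorem enum_filter_pos (s : List String) (w : String) :
    ∀ (st : Nat),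
      (((PySem.List.enumerate s (st : Int)).filter (fun p => p.2 == w)).map (fun p => p.1))
        = (posNat s w).map (fun n => ((st + n : Nat) : Int)) := by
  induction s with
  | nil => intro st; simp [PySem.List.enumerate_nil, posNat]
  | cons x xs ih =>
    intro st
    rw [PySem.List.enumerate_cons]
    by_cases hxw : x = w
    · have hp : posNat (x :: xs) w = 0 :: (posNat xs w).map (· + 1) := by simp [posNat, hxw]
      rw [hp]
      have h1 : ((st : Int) + 1) = ((st + 1 : Nat) : Int) := by push_cast; ring
      simp only [List.filter_cons, List.map_cons, hxw]
      rw [if_pos (by simp), h1, List.map_cons, ih (st + 1), List.map_map]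
      refine List.cons_eq_cons.mpr ⟨by simp, ?_⟩
      simp only [Function.comp_def]
      apply List.map_congr_left
      intro a _
      congr 1
      omega
    · have hp : posNat (x :: xs) w = (posNat xs w).map (· + 1) := by simp [posNat, hxw]
      rw [hp]
      have h1 : ((st : Int) + 1) = ((st + 1 : Nat) : Int) := by push_cast; ring
      simp only [List.filter_cons]
      rw [if_neg (by simp [hxw]), h1, ih (st + 1), List.map_map]
      simp only [Function.comp_def]
      apply List.map_congr_left
      intro a _
      congr 1
      omega

theorem loop_eq_canon (s : List String) :
    ∀ (n i : Nat) (repeats seen : List String), s.length - i = n →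
      (∀ w, w ∈ seen ↔ 1 ≤ (s.take i).count w) →
      (∀ w, w ∈ repeats ↔ 2 ≤ (s.take i).count w) →
      repeated_word_loop s repeats seen i n =
        repeats ++ (((PySem.List.enumerate (s.drop i) (i : Int)).filter
          (fun p => (s.take p.1.toNat).count p.2 == 1)).map (fun p => p.2)) := by
  intro n
  induction n with
  | zero =>
    intro i repeats seen hn hseen hrep
    rw [repeated_word_loop, List.drop_eq_nil_of_le (by omega)]
    simp [PySem.List.enumerate_nil]
  | succ n ihn =>
    intro i repeats seen hn hseen hrep
    rw [repeated_word_loop]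
    by_cases h : i < s.length
    · rw [dif_pos h]
      have hdrop : s.drop i = s[i] :: s.drop (i + 1) := (List.getElem_cons_drop h).symm
      rw [hdrop, PySem.List.enumerate_cons]
      set w := s[i] with hw
      have hcast : ((i : Int) + 1) = ((i + 1 : Nat) : Int) := by push_cast; ring
      have htake : s.take (i + 1) = s.take i ++ [w] := by
        rw [List.take_add_one, List.getElem?_eq_getElem h]; rfl
      have hcnt : ∀ v, (s.take (i + 1)).count v =
          (s.take i).count v + if v = w then 1 else 0 := by
        intro v
        rw [htake, List.count_append]
        by_cases hv : v = w
        · simp [hv]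
        · have hv' : ¬ w = v := fun h' => hv h'.symm
          simp [hv, hv']
      simp only [List.filter_cons]
      by_cases hs : w ∈ seen
      · have h1 : 1 ≤ (s.take i).count w := (hseen w).1 hs
        by_cases hr : w ∈ repeats
        · have h2 : 2 ≤ (s.take i).count w := (hrep w).1 hr
          rw [if_pos hs, if_neg (by simp [hr])]
          have hcond : ¬ (((s.take ((i : Int), w).1.toNat).count ((i : Int), w).2 == 1) = true) := by
            show ¬ (((s.take i).count w == 1) = true)
            simp only [beq_iff_eq]
            omega
          rw [if_neg hcond, hcast]
          exact ihn (i + 1) repeats seen (by omega)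
            (by intro v; rw [hcnt v]; by_cases hv : v = w
                · subst hv
                  rw [if_pos rfl]
                  exact ⟨fun _ => by omega, fun _ => hs⟩
                · rw [if_neg hv, Nat.add_zero]; exact hseen v)
            (by intro v; rw [hcnt v]; by_cases hv : v = w
                · subst hv
                  rw [if_pos rfl]
                  exact ⟨fun _ => by omega, fun _ => hr⟩
                · rw [if_neg hv, Nat.add_zero]; exact hrep v)
        · have h2 : ¬ 2 ≤ (s.take i).count w := fun hc => hr ((hrep w).2 hc)
          rw [if_pos hs, if_pos (by simp [hr])]
          have hcond : (((s.take ((i : Int), w).1.toNat).count ((i : Int), w).2 == 1) = true) := by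
            show (((s.take i).count w == 1) = true)
            simp only [beq_iff_eq]
            omega
          rw [if_pos hcond, hcast, List.map_cons]
          rw [ihn (i + 1) (repeats ++ [w]) seen (by omega)
            (by intro v; rw [hcnt v]; by_cases hv : v = w
                · subst hv
                  rw [if_pos rfl]
                  exact ⟨fun _ => by omega, fun _ => hs⟩
                · rw [if_neg hv, Nat.add_zero]; exact hseen v)
            (by intro v; rw [hcnt v]; by_cases hv : v = w
                · subst hv
                  rw [if_pos rfl]
                  exact ⟨fun _ => by omega,
                    fun _ => List.mem_append_right _ (by simp)⟩
                · rw [if_neg hv, Nat.add_zero, List.mem_append]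
                  constructor
                  · rintro (h' | h')
                    · exact (hrep v).1 h'
                    · exact absurd (by simpa using h') hv
                  · intro h'; exact Or.inl ((hrep v).2 h'))]
          simp
      · have h1 : ¬ 1 ≤ (s.take i).count w := fun hc => hs ((hseen w).2 hc)
        rw [if_neg hs]
        have hcond : ¬ (((s.take ((i : Int), w).1.toNat).count ((i : Int), w).2 == 1) = true) := by
          show ¬ (((s.take i).count w == 1) = true)
          simp only [beq_iff_eq]
          omega
        rw [if_neg hcond, hcast]
        exact ihn (i + 1) repeats (seen ++ [w]) (by omega)
          (by intro v; rw [hcnt v]; by_cases hv : v = w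
              · subst hv
                rw [if_pos rfl]
                exact ⟨fun _ => by omega,
                  fun _ => List.mem_append_right _ (by simp)⟩
              · rw [if_neg hv, Nat.add_zero, List.mem_append]
                constructor
                · rintro (h' | h')
                  · exact (hseen v).1 h'
                  · exact absurd (by simpa using h') hv
                · intro h'; exact Or.inl ((hseen v).2 h'))
          (by intro v; rw [hcnt v]; by_cases hv : v = w
              · subst hv
                rw [if_pos rfl]
                refine ⟨fun hmem => ?_, fun hx => absurd hx (by omega)⟩
                have := (hrep w).1 hmem
                omega
              · rw [if_neg hv, Nat.add_zero]; exact hrep v)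
    · omega

theorem pyGetD_one (xs : List Int) (v : Int) (h : xs[1]? = some v) :
    PySem.List.pyGetD xs 1 0 = v := by
  have hl : 1 < xs.length := (List.getElem?_eq_some_iff.mp h).1
  simp [PySem.List.pyGetD, PySem.List.pyGet?, PySem.List.pyIdx?, hl]
  exact (List.getElem?_eq_some_iff.mp h).2

theorem length_pvPos (s : List String) (w : String) : (pvPos s w).length = s.count w := by
  simp [pvPos, length_posNat]

theorem occB_getD (s : List String) (w : String) : (occB s).getD w [] = pvPos s w := by
  have h1 : occB s = ((PySem.List.enumerate s).map (fun p => (p.2, p.1))).foldl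
      (fun d q => d.modify q.1 [] (fun l => l ++ [q.2])) PySem.Dict.empty := by
    rw [occB, List.foldl_map]
  rw [h1, PySem.Dict.getD_foldl_modify_append, PySem.Dict.getD_empty, List.nil_append,
    List.filter_map, List.map_map]
  simp only [Function.comp_def]
  have h2 := enum_filter_pos s w 0
  simp only [Nat.cast_zero, Nat.zero_add] at h2
  rw [pvPos]
  exact h2

theorem occB_keys (s : List String) : (occB s).keys = PySem.Set.ofList s := by
  rw [occB, PySem.Dict.keys_foldl_modify_key (PySem.List.enumerate s) (fun p => p.2) []
    (fun d p => fun l => l ++ [p.1]) PySem.Dict.empty]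
  rw [PySem.List.map_snd_enumerate, PySem.Dict.keys_empty, PySem.Set.ofList_eq_foldl]
  rfl

theorem occB_nodup_keys (s : List String) : (occB s).keys.Nodup := by
  rw [occB]
  exact PySem.Dict.nodup_keys_foldl_modify_key (PySem.List.enumerate s) (fun p => p.2) []
    (fun d p => fun l => l ++ [p.1]) PySem.Dict.empty (by simp [PySem.Dict.keys_empty])

theorem occB_items (s : List String) :
    (occB s).items = (PySem.Set.ofList s).map (fun w => (w, pvPos s w)) := by
  rw [PySem.Dict.items_eq_map_keys (occB s) (occB_nodup_keys s) [], occB_keys]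
  exact List.map_congr_left (fun w _ => by rw [occB_getD])

theorem dups_eq (s : List String) :
    ((occB s).items.filter (fun kv => decide (2 ≤ kv.2.length))).map
        (fun kv => (PySem.List.pyGetD kv.2 1 0, kv.1))
      = (Qset s).map (gfun s) := by
  rw [occB_items, List.filter_map, List.map_map]
  rfl

theorem mem_canonP_eq (s : List String) (p : Int × String) (hp : p ∈ canonP s) :
    gfun s p.2 = p ∧ 2 ≤ (pvPos s p.2).length := by
  rw [canonP, List.mem_filter] at hp
  obtain ⟨hp1, hp2⟩ := hp
  obtain ⟨k, hk, rfl⟩ := (PySem.List.mem_enumerate_iff s 0 p).mp hp1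
  simp only [zero_add] at hp2 ⊢
  have hcond : (s.take k).count s[k] = 1 := by
    simpa [Int.toNat_natCast] using hp2
  have hK : (posNat s s[k])[1]? = some k :=
    (posNat_getElem? s s[k] 1 k).mpr ⟨List.getElem?_eq_getElem hk, hcond⟩
  have hPv : (pvPos s s[k])[1]? = some ((k : Nat) : Int) := by
    rw [pvPos, List.getElem?_map, hK]; rfl
  constructor
  · rw [gfun, pyGetD_one _ _ hPv]
  · have := (List.getElem?_eq_some_iff.mp hPv).1
    omega

theorem mem_canon_snd (s : List String) (w : String) :
    w ∈ (canonP s).map (fun p => p.2) ↔ 2 ≤ s.count w := by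
  constructor
  · intro hw
    obtain ⟨p, hp, rfl⟩ := List.mem_map.mp hw
    have h := (mem_canonP_eq s p hp).2
    rwa [length_pvPos] at h
  · intro hcnt
    have hlen : 1 < (posNat s w).length := by rw [length_posNat]; omega
    have hK : (posNat s w)[1]? = some ((posNat s w)[1]) := List.getElem?_eq_getElem hlen
    obtain ⟨hget, hc1⟩ := (posNat_getElem? s w 1 ((posNat s w)[1])).mp hK
    set i := (posNat s w)[1] with hi
    obtain ⟨hilt, hiw⟩ := List.getElem?_eq_some_iff.mp hget
    refine List.mem_map.mpr ⟨((i : Int), w), ?_, rfl⟩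
    rw [canonP, List.mem_filter]
    constructor
    · exact (PySem.List.mem_enumerate_iff s 0 _).mpr ⟨i, hilt, by rw [hiw]; simp⟩
    · simp [Int.toNat_natCast, hc1]

theorem pairwise_lt_canonP (s : List String) :
    (canonP s).Pairwise (fun p q => p.1 < q.1) := by
  rw [canonP]
  exact (PySem.List.pairwise_lt_enumerate s 0).filter _

theorem nodup_canon_snd (s : List String) : ((canonP s).map (fun p => p.2)).Nodup := by
  refine List.pairwise_map.mpr ?_
  refine (pairwise_lt_canonP s).imp_of_mem ?_
  intro a b ha hb hlt heq
  have h1 := (mem_canonP_eq s a ha).1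
  have h2 := (mem_canonP_eq s b hb).1
  rw [← h1, ← h2, heq] at hlt
  exact lt_irrefl _ hlt

theorem nodup_Qset (s : List String) : (Qset s).Nodup :=
  (PySem.Set.nodup_ofList s).filter _

theorem mem_Qset (s : List String) (w : String) : w ∈ Qset s ↔ 2 ≤ s.count w := by
  rw [Qset, List.mem_filter]
  constructor
  · rintro ⟨-, h⟩
    have := of_decide_eq_true h
    rwa [length_pvPos] at this
  · intro h
    refine ⟨(PySem.Set.mem_ofList s w).mpr ?_, decide_eq_true ?_⟩
    · exact List.count_pos_iff.mp (by omega)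
    · rw [length_pvPos]; exact h

theorem canon_perm (s : List String) : (canonP s).Perm ((Qset s).map (gfun s)) := by
  have h1 : (canonP s) = ((canonP s).map (fun p => p.2)).map (gfun s) := by
    rw [List.map_map]
    symm
    exact (List.map_congr_left (fun p hp => (mem_canonP_eq s p hp).1)).trans (List.map_id _)
  have h2 : ((canonP s).map (fun p => p.2)).Perm (Qset s) :=
    (List.perm_ext_iff_of_nodup (nodup_canon_snd s) (nodup_Qset s)).mpr
      (fun w => (mem_canon_snd s w).trans (mem_Qset s w).symm)
  have h3 := h2.map (gfun s)
  rwa [← h1] at h3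

theorem repeated_word_eq_canon (s : List String) :
    repeated_word s = (canonP s).map (fun p => p.2) := by
  rw [repeated_word, loop_eq_canon s s.length 0 [] [] (by omega)
    (by intro w; simp) (by intro w; simp)]
  rw [List.drop_zero, List.nil_append, canonP]
  norm_num

theorem repeated_word_alt_eq_canon (s : List String) :
    repeated_word_alt s = (canonP s).map (fun p => p.2) := by
  show (PySem.List.sorted
      (((occB s).items.filter (fun kv => decide (2 ≤ kv.2.length))).map
        (fun kv => (PySem.List.pyGetD kv.2 1 0, kv.1)))
      (fun p => p.1) false).map (fun p => p.2) = _
  rw [dups_eq, PySem.List.sorted_eq_of_perm_of_pairwise_lt _ (canonP s) _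
    (canon_perm s) (pairwise_lt_canonP s)]

-- ===== VERDICT (by name: the statement is the Claim_ definition above) =====
theorem repeated_word_spec : Claim_equal_repeated_word := by
  intro strings _
  unfold Spec_repeated_word
  rw [repeated_word_eq_canon, repeated_word_alt_eq_canon]
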